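-- pv_equiv track=rewrite | github.com/tannervoutour/documentProcessor | ui/utils.py | validate_document_selection
-- ===== SOURCE A (Python) =====
-- from typing import Dict, List, Optional
--
-- def validate_document_selection(selected_docs: List[Dict]) -> List[str]:
--     """Validate selected documents and return errors"""
--     errors = []
--
--     if not selected_docs:
--         errors.append("No documents selected")
--         return errors
--
--     for doc in selected_docs:
--         doc_errors = []
--
--         # Check machine names
--         machine_names = doc.get('Machine Names', '').strip()
--         if not machine_names:
--             doc_errors.append("Machine names required")
--
--         # Check document type
--         doc_type = doc.get('Document Type', '').strip()
--         if not doc_type: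
--             doc_errors.append("Document type required")
--         elif doc_type not in ['manual', 'diagram', 'sparepartslist', 'spreadsheet', 'plain_document']:
--             doc_errors.append("Invalid document type")
--
--         # Check processing method
--         processing_method = doc.get('Processing Method', '').strip()
--         if not processing_method:
--             doc_errors.append("Processing method required")
--         elif processing_method not in ['markdown', 'plain_text']:
--             doc_errors.append("Invalid processing method")
--
--         if doc_errors:
--             errors.append(f"**{doc['Filename']}**: {', '.join(doc_errors)}")
--
--     return errors
-- ===== SOURCE B (Python) =====
-- def validate_document_selection(selected_docs):
--     """Validate selected documents and return errors.
--
--     Staged-passes version: one map pass per field producing a per-document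
--     marker ('' = ok, else the error message), then one zip pass that filters
--     the markers and formats the per-document error line.
--     """
--     if not selected_docs:
--         return ["No documents selected"]
--
--     def field(doc, key):
--         return doc.get(key, '').strip()
--
--     def classify(value, allowed, required_msg, invalid_msg):
--         if not value:
--             return required_msg
--         if allowed is not None and value not in allowed:
--             return invalid_msg
--         return ""
--
--     machine_col = [classify(field(d, 'Machine Names'), None,
--                             "Machine names required", "") for d in selected_docs]
--     type_col = [classify(field(d, 'Document Type'),
--                          ('manual', 'diagram', 'sparepartslist', 'spreadsheet',
--                           'plain_document'),
--                          "Document type required", "Invalid document type")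
--                 for d in selected_docs]
--     method_col = [classify(field(d, 'Processing Method'),
--                            ('markdown', 'plain_text'),
--                            "Processing method required",
--                            "Invalid processing method")
--                   for d in selected_docs]
--
--     errors = []
--     for doc, m, t, p in zip(selected_docs, machine_col, type_col, method_col):
--         msgs = [x for x in (m, t, p) if x]
--         if msgs:
--             errors.append("**{}**: {}".format(doc['Filename'], ', '.join(msgs)))
--     return errors
-- ===== Notes on version B (the rewrite author's own statement) =====
-- stated objective: alternative
-- what changed: Replaces A's single loop with nested per-field branches by a staged-passes pipeline: one map pass per field producing a per-document marker string ('' = ok), then one zip pass that filters markers and formats the error line; the accumulating doc_errors list disappears.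
import Mathlib
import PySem

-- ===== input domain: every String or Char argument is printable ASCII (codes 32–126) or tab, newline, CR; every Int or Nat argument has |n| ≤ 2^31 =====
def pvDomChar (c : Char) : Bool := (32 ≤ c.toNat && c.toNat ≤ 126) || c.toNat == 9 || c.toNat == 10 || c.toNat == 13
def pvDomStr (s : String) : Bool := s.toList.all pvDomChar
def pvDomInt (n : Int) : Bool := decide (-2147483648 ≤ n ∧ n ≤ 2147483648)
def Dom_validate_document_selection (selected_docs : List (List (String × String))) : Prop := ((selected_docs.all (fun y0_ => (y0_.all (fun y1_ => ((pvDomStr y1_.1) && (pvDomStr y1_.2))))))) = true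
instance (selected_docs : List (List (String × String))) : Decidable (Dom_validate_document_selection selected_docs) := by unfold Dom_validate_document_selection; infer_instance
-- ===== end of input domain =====

-- B replaces A's single loop with per-field branches by a staged-passes pipeline
-- (one map pass per field producing marker strings, then one zip-and-filter pass);
-- same O(n) cost, a genuinely different decomposition.


-- ===== PORT A =====
-- f"**{doc['Filename']}**: {', '.join(doc_errors)}"; doc['Filename'] is total here via getD ""
-- (Pre_ guarantees the key is present whenever this line runs in Python).
def pvFmtA (fn : String) (errs : List String) : String :=
  PySem.Str.join "" ["**", fn, "**: ", PySem.Str.join ", " errs]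

-- the body of A's per-document loop building doc_errors
def pvCheckA (doc : List (String × String)) : List String :=
  let d := PySem.Dict.mk doc
  let machine_names := PySem.Str.strip (d.getD "Machine Names" "")
  let e1 : List String := if machine_names == "" then [] ++ ["Machine names required"] else []
  let doc_type := PySem.Str.strip (d.getD "Document Type" "")
  let e2 : List String :=
    if doc_type == "" then e1 ++ ["Document type required"]
    else if !(["manual", "diagram", "sparepartslist", "spreadsheet", "plain_document"].contains doc_type) then
      e1 ++ ["Invalid document type"]
    else e1
  let processing_method := PySem.Str.strip (d.getD "Processing Method" "")
  if processing_method == "" then e2 ++ ["Processing method required"]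
  else if !(["markdown", "plain_text"].contains processing_method) then
    e2 ++ ["Invalid processing method"]
  else e2

def validate_document_selection (selected_docs : List (List (String × String))) : List String :=
  if selected_docs.isEmpty then [] ++ ["No documents selected"]
  else
    selected_docs.foldl (fun errors doc =>
      let doc_errors := pvCheckA doc
      if doc_errors.isEmpty then errors
      else errors ++ [pvFmtA ((PySem.Dict.mk doc).getD "Filename" "") doc_errors]) []

-- ===== PORT B =====
-- helper field(doc, key) = doc.get(key, '').strip()
def pvFieldB (doc : List (String × String)) (key : String) : String :=
  PySem.Str.strip ((PySem.Dict.mk doc).getD key "")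

-- helper classify(value, allowed, required_msg, invalid_msg)
def pvClassifyB (value : String) (allowed : Option (List String))
    (required_msg invalid_msg : String) : String :=
  if value == "" then required_msg
  else match allowed with
    | none => ""
    | some al => if !(al.contains value) then invalid_msg else ""

def pvFmtB (fn : String) (msgs : List String) : String :=
  PySem.Str.join "" ["**", fn, "**: ", PySem.Str.join ", " msgs]

def validate_document_selection_alt (selected_docs : List (List (String × String))) : List String :=
  if selected_docs.isEmpty then ["No documents selected"]
  else
    -- three staged map passes, one marker column per field
    let machine_col := selected_docs.map (fun d =>
      pvClassifyB (pvFieldB d "Machine Names") none "Machine names required" "")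
    let type_col := selected_docs.map (fun d =>
      pvClassifyB (pvFieldB d "Document Type")
        (some ["manual", "diagram", "sparepartslist", "spreadsheet", "plain_document"])
        "Document type required" "Invalid document type")
    let method_col := selected_docs.map (fun d =>
      pvClassifyB (pvFieldB d "Processing Method")
        (some ["markdown", "plain_text"])
        "Processing method required" "Invalid processing method")
    -- final zip pass: filter markers, format
    (selected_docs.zip (machine_col.zip (type_col.zip method_col))).foldl
      (fun errors z =>
        let msgs := [z.2.1, z.2.2.1, z.2.2.2].filter (fun x => x != "")
        if msgs.isEmpty then errors
        else errors ++ [pvFmtB ((PySem.Dict.mk z.1).getD "Filename" "") msgs]) []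

-- ===== PRECONDITION & SPEC =====
-- a document passes every check (so A never reads doc['Filename'] for it)
def pvDocOk (doc : List (String × String)) : Bool :=
  let d := PySem.Dict.mk doc
  (PySem.Str.strip (d.getD "Machine Names" "") != "") &&
  (["manual", "diagram", "sparepartslist", "spreadsheet", "plain_document"].contains
     (PySem.Str.strip (d.getD "Document Type" ""))) &&
  (["markdown", "plain_text"].contains (PySem.Str.strip (d.getD "Processing Method" "")))

-- Pre_ excludes exactly the inputs where both Pythons raise KeyError('Filename'):
-- a document that fails some check yet has no 'Filename' key.
def Pre_validate_document_selection (selected_docs : List (List (String × String))) : Prop :=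
  (selected_docs.all (fun doc => pvDocOk doc || (PySem.Dict.mk doc).contains "Filename")) = true
instance (selected_docs : List (List (String × String))) : Decidable (Pre_validate_document_selection selected_docs) := by unfold Pre_validate_document_selection; infer_instance

def pvWitness_validate_document_selection : (List (List (String × String))) :=
  [[("Filename", "a.pdf"), ("Machine Names", ""), ("Document Type", "manual"), ("Processing Method", "markdown")]]

def Spec_validate_document_selection (selected_docs : List (List (String × String))) (out : List String) : Prop := out = validate_document_selection_alt selected_docs
instance (selected_docs : List (List (String × String))) (out : List String) : Decidable (Spec_validate_document_selection selected_docs out) := by unfold Spec_validate_document_selection; infer_instance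

-- ===== CLAIM (what is proved, stated in full; the proofs are below) =====
def Claim_equal_validate_document_selection : Prop := ∀ (selected_docs : List (List (String × String))), Dom_validate_document_selection selected_docs → Pre_validate_document_selection selected_docs → Spec_validate_document_selection selected_docs (validate_document_selection selected_docs)

-- ===== LEMMAS AND PROOFS =====
-- per-document: filtering B's three markers gives exactly A's doc_errors list
theorem pvMarkers_eq (doc : List (String × String)) :
    ([pvClassifyB (pvFieldB doc "Machine Names") none "Machine names required" "",
      pvClassifyB (pvFieldB doc "Document Type")
        (some ["manual", "diagram", "sparepartslist", "spreadsheet", "plain_document"])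
        "Document type required" "Invalid document type",
      pvClassifyB (pvFieldB doc "Processing Method")
        (some ["markdown", "plain_text"])
        "Processing method required" "Invalid processing method"].filter (fun x => x != ""))
    = pvCheckA doc := by
  unfold pvClassifyB pvFieldB pvCheckA
  split_ifs <;> simp_all <;> split_ifs <;> simp_all

-- the zip-of-maps fold in B equals A's single fold, for any accumulator
theorem pvFold_eq (ds : List (List (String × String))) (errors : List String) :
    (ds.zip ((ds.map (fun d =>
        pvClassifyB (pvFieldB d "Machine Names") none "Machine names required" "")).zip
      ((ds.map (fun d =>
        pvClassifyB (pvFieldB d "Document Type")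
          (some ["manual", "diagram", "sparepartslist", "spreadsheet", "plain_document"])
          "Document type required" "Invalid document type")).zip
       (ds.map (fun d =>
        pvClassifyB (pvFieldB d "Processing Method")
          (some ["markdown", "plain_text"])
          "Processing method required" "Invalid processing method"))))).foldl
      (fun errors z =>
        let msgs := [z.2.1, z.2.2.1, z.2.2.2].filter (fun x => x != "")
        if msgs.isEmpty then errors
        else errors ++ [pvFmtB ((PySem.Dict.mk z.1).getD "Filename" "") msgs]) errors
    = ds.foldl (fun errors doc =>
        let doc_errors := pvCheckA doc
        if doc_errors.isEmpty then errors
        else errors ++ [pvFmtA ((PySem.Dict.mk doc).getD "Filename" "") doc_errors]) errors := by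
  induction ds generalizing errors with
  | nil => rfl
  | cons d ds ih =>
      simp only [List.map_cons, List.zip_cons_cons, List.foldl_cons]
      rw [show pvFmtB = pvFmtA from rfl]
      rw [pvMarkers_eq d]
      exact ih _

-- ===== VERDICT (by name: the statement is the Claim_ definition above) =====
theorem validate_document_selection_spec : Claim_equal_validate_document_selection := by
  intro selected_docs _ _
  unfold Spec_validate_document_selection validate_document_selection validate_document_selection_alt
  split
  · rfl
  · exact (pvFold_eq selected_docs []).symm
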